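-- pv_equiv track=rewrite | github.com/pernyblom/ecfm | experiments/pose_dynamics/data/track_projection_dataset.py | _parse_frame_time
-- ===== SOURCE A (Python) =====
-- from typing import Dict, List, Optional, Tuple
--
-- def _parse_frame_time(name: str) -> Optional[int]:
--     parts = name.split("_frame_")
--     if len(parts) < 2:
--         return None
--     tail = parts[1]
--     digits = ""
--     for ch in tail:
--         if ch.isdigit():
--             digits += ch
--         else:
--             break
--     return int(digits) if digits else None
-- ===== SOURCE B (Python) =====
-- from typing import Optional
--
--
-- def _parse_frame_time(name: str) -> Optional[int]:
--     # Single left-to-right pass: a 8-state automaton matches the first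
--     # occurrence of "_frame_" (KMP-style fallback: the pattern's only proper
--     # border starts with '_') and then collects the digit run in the same loop.
--     pattern = "_frame_"
--     state = 0
--     digits = ""
--     for ch in name:
--         if state == 7:
--             if '0' <= ch <= '9':
--                 digits += ch
--             else:
--                 break
--         elif ch == pattern[state]:
--             state += 1
--         else:
--             state = 1 if ch == '_' else 0
--     return int(digits) if digits else None
-- ===== Notes on version B (the rewrite author's own statement) =====
-- stated objective: alternative
-- what changed: B replaces split('_frame_') plus a separate digit-prefix loop by one single-pass 8-state automaton over the string: a KMP-style matcher (fallback state 1 on '_', else 0) locates the first '_frame_' and the same loop then collects the digit run.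
import Mathlib
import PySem

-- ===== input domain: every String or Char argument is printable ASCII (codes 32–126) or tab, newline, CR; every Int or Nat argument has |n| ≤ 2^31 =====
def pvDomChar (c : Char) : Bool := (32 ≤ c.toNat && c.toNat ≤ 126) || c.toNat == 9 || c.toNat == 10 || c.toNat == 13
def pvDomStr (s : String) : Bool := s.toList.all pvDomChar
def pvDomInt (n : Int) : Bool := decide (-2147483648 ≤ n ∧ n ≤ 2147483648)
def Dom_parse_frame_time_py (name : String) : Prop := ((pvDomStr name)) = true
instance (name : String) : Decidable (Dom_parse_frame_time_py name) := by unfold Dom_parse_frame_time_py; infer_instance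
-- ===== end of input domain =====

-- B replaces split("_frame_") plus a separate digit-prefix loop by one single-pass
-- 8-state automaton (KMP-style fallback on '_') that finds the first "_frame_" and
-- collects the following digit run in the same loop.

-- ===== PORT A =====
-- the for-loop over `tail` accumulating `digits`, with `break` on the first non-digit
def pvA_digits (digits : List Char) : List Char → List Char
  | [] => digits
  | c :: rest =>
    if PySem.Chars.isdigit c then pvA_digits (digits ++ [c]) rest else digits

def parse_frame_time_py (name : String) : Option Int :=
  let parts := PySem.Chars.splitOn name.toList ("_frame_".toList)
  if parts.length < 2 then none
  else
    match PySem.List.pyGet? parts 1 with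
    | none => none
    | some tail =>
      let digits := pvA_digits [] tail
      if digits.isEmpty then none else PySem.Int.ofChars? digits

-- ===== PORT B =====
-- the single for-loop over `name`: states 0–6 match "_frame_" (on a mismatch fall
-- back to 1 if the char is '_', else 0), state 7 accumulates digits and breaks
def pvB_loop (state : Nat) (digits : List Char) : List Char → List Char
  | [] => digits
  | c :: rest =>
    if state = 7 then
      if '0' ≤ c ∧ c ≤ '9' then pvB_loop 7 (digits ++ [c]) rest else digits
    else if c = ("_frame_".toList).getD state ' ' then pvB_loop (state + 1) digits rest
    else pvB_loop (if c = '_' then 1 else 0) digits rest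

def parse_frame_time_py_alt (name : String) : Option Int :=
  let digits := pvB_loop 0 [] name.toList
  if digits.isEmpty then none else PySem.Int.ofChars? digits

-- ===== PRECONDITION & SPEC =====
def Spec_parse_frame_time_py (name : String) (out : Option Int) : Prop := out = parse_frame_time_py_alt name
instance (name : String) (out : Option Int) : Decidable (Spec_parse_frame_time_py name out) := by unfold Spec_parse_frame_time_py; infer_instance

-- ===== CLAIM (what is proved, stated in full; the proofs are below) =====
def Claim_equal_parse_frame_time_py : Prop := ∀ (name : String), Dom_parse_frame_time_py name → Spec_parse_frame_time_py name (parse_frame_time_py name)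

-- ===== LEMMAS AND PROOFS =====

theorem pv_go_fuel (sep : List Char) (hsep : sep ≠ []) :
    ∀ (f1 f2 : Nat) (l cur : List Char) (acc : List (List Char)), l.length < f1 → l.length < f2 →
      PySem.Chars.splitOn.go sep f1 l cur acc = PySem.Chars.splitOn.go sep f2 l cur acc := by
  intro f1
  induction f1 with
  | zero => intro f2 l cur acc h1 _; omega
  | succ f ih =>
    intro f2 l cur acc h1 h2
    match l, f2 with
    | [], f2 =>
      match f2 with
      | f2 + 1 => rfl
    | c :: rest, f2 + 1 =>
      show (if sep.isPrefixOf (c::rest) then PySem.Chars.splitOn.go sep f ((c::rest).drop sep.length) [] (cur.reverse :: acc)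
            else PySem.Chars.splitOn.go sep f rest (c::cur) acc) =
           (if sep.isPrefixOf (c::rest) then PySem.Chars.splitOn.go sep f2 ((c::rest).drop sep.length) [] (cur.reverse :: acc)
            else PySem.Chars.splitOn.go sep f2 rest (c::cur) acc)
      by_cases hp : sep.isPrefixOf (c::rest)
      · have hlen : sep.length ≥ 1 := by
          cases sep with | nil => exact absurd rfl hsep | cons a b => simp
        have : ((c::rest).drop sep.length).length < f ∧ ((c::rest).drop sep.length).length < f2 := by
          simp only [List.length_drop, List.length_cons] at *
          omega
        simp only [hp, if_true]
        exact ih f2 _ [] _ this.1 this.2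
      · simp only [hp]
        exact ih f2 rest (c::cur) acc (by simp at h1 ⊢; omega) (by simp at h2 ⊢; omega)

theorem pv_go_acc (sep : List Char) :
    ∀ (f : Nat) (l cur : List Char) (acc : List (List Char)),
      PySem.Chars.splitOn.go sep f l cur acc = acc.reverse ++ PySem.Chars.splitOn.go sep f l cur [] := by
  intro f
  induction f with
  | zero => intro l cur acc; show ((cur.reverse ++ l) :: acc).reverse = _; simp; rfl
  | succ f ih =>
    intro l cur acc
    match l with
    | [] => show (cur.reverse :: acc).reverse = _; simp; rfl
    | c :: rest =>
      show (if sep.isPrefixOf (c::rest) then PySem.Chars.splitOn.go sep f ((c::rest).drop sep.length) [] (cur.reverse :: acc)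
            else PySem.Chars.splitOn.go sep f rest (c::cur) acc) = _
      by_cases hp : sep.isPrefixOf (c::rest)
      · simp only [hp, if_true]
        rw [ih _ [] (cur.reverse :: acc)]
        conv_rhs =>
          rw [show PySem.Chars.splitOn.go sep (f+1) (c::rest) cur [] =
              PySem.Chars.splitOn.go sep f ((c::rest).drop sep.length) [] [cur.reverse] by
                simp [PySem.Chars.splitOn.go, hp]]
          rw [ih _ [] [cur.reverse]]
        simp
      · simp only [hp]
        rw [ih rest (c::cur) acc]
        conv_rhs =>
          rw [show PySem.Chars.splitOn.go sep (f+1) (c::rest) cur [] =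
              PySem.Chars.splitOn.go sep f rest (c::cur) [] by
                simp [PySem.Chars.splitOn.go, hp]]
        simp

def pvAfter (sep : List Char) : List Char → Option (List Char)
  | [] => none
  | c :: rest =>
    if sep.isPrefixOf (c :: rest) then some (List.drop sep.length (c :: rest))
    else pvAfter sep rest

def pvBefore (sep : List Char) : List Char → List Char
  | [] => []
  | c :: rest =>
    if sep.isPrefixOf (c :: rest) then []
    else c :: pvBefore sep rest

theorem pv_go_spec (sep : List Char) (hsep : sep ≠ []) :
    ∀ (f : Nat) (l cur : List Char) (acc : List (List Char)), l.length < f →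
      PySem.Chars.splitOn.go sep f l cur acc =
        match pvAfter sep l with
        | none => acc.reverse ++ [cur.reverse ++ l]
        | some t => acc.reverse ++ [cur.reverse ++ pvBefore sep l] ++ PySem.Chars.splitOn t sep := by
  intro f
  induction f with
  | zero => intro l cur acc h; omega
  | succ f ih =>
    intro l cur acc h
    match l with
    | [] => show (cur.reverse :: acc).reverse = _; simp [pvAfter]
    | c :: rest =>
      show (if sep.isPrefixOf (c::rest) then PySem.Chars.splitOn.go sep f ((c::rest).drop sep.length) [] (cur.reverse :: acc)
            else PySem.Chars.splitOn.go sep f rest (c::cur) acc) = _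
      by_cases hp : sep.isPrefixOf (c::rest)
      · have hlen : 1 ≤ sep.length := by
          cases sep with | nil => exact absurd rfl hsep | cons a b => simp
        have hdl : ((c::rest).drop sep.length).length < f := by
          simp only [List.length_drop, List.length_cons] at *; omega
        simp only [hp, if_true, pvAfter, pvBefore]
        rw [pv_go_acc]
        rw [pv_go_fuel sep hsep f (((c::rest).drop sep.length).length + 1) _ [] [] hdl (by omega)]
        show _ = acc.reverse ++ [cur.reverse ++ []] ++ PySem.Chars.splitOn ((c::rest).drop sep.length) sep
        simp [PySem.Chars.splitOn]
      · simp only [hp, pvAfter, pvBefore]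
        rw [ih rest (c::cur) acc (by simp at h ⊢; omega)]
        cases hA : pvAfter sep rest with
        | none => simp
        | some t => simp

theorem pvAfter_decomp (sep : List Char) :
    ∀ l t, pvAfter sep l = some t → l = pvBefore sep l ++ sep ++ t := by
  intro l
  induction l with
  | nil => intro t h; simp [pvAfter] at h
  | cons c rest ih =>
    intro t h
    by_cases hp : sep.isPrefixOf (c :: rest)
    · simp only [pvAfter, hp, if_true, Option.some.injEq] at h
      obtain ⟨u, hu⟩ := List.isPrefixOf_iff_prefix.mp hp
      simp only [pvBefore, hp, if_true, List.nil_append]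
      rw [← h, ← hu]
      simp
    · simp [pvAfter, hp] at h
      have h2 := ih t h
      simp only [pvBefore, hp, List.append_assoc] at h2 ⊢
      exact congrArg (c :: ·) h2

theorem pvA_digits_eq (acc l : List Char) :
    pvA_digits acc l = acc ++ l.takeWhile PySem.Chars.isdigit := by
  induction l generalizing acc with
  | nil => simp [pvA_digits]
  | cons c rest ih =>
    simp only [pvA_digits, List.takeWhile]
    by_cases h : PySem.Chars.isdigit c
    · simp [h, ih]
    · simp [h]

theorem takeWhile_append_false (p : Char → Bool) (xs ys : List Char) (y : Char)
    (hy : p y = false) :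
    (xs ++ y :: ys).takeWhile p = xs.takeWhile p := by
  induction xs with
  | nil => simp [List.takeWhile, hy]
  | cons c rest ih =>
    simp only [List.cons_append, List.takeWhile]
    by_cases h : p c
    · simp [h, ih]
    · simp [h]

-- state 7: the loop accumulates exactly the leading digit run
theorem pvB_loop_seven (l digits : List Char) :
    pvB_loop 7 digits l = digits ++ l.takeWhile PySem.Chars.isdigit := by
  induction l generalizing digits with
  | nil => simp [pvB_loop]
  | cons c rest ih =>
    simp only [pvB_loop, List.takeWhile]
    by_cases h : PySem.Chars.isdigit c
    · have h' : '0' ≤ c ∧ c ≤ '9' := by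
        simpa [PySem.Chars.isdigit] using h
      simp [h', h, ih]
    · have h' : ¬ ('0' ≤ c ∧ c ≤ '9') := by
        simpa [PySem.Chars.isdigit] using h
      simp [h', h]

-- states 0–6: the matcher invariant.  Having reached state st is the same as
-- virtually having read the prefix (pat.take st); the loop result is `digits` when
-- "_frame_" never occurs, else digits ++ (digit run after the first occurrence).
theorem pvB_loop_nil (st : Nat) (digits : List Char) : pvB_loop st digits [] = digits := rfl

theorem pvB_loop_cons (st : Nat) (hst : st ≠ 7) (digits : List Char) (c : Char) (rest : List Char) :
    pvB_loop st digits (c :: rest) =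
      (if c = ("_frame_".toList).getD st ' ' then pvB_loop (st + 1) digits rest
       else pvB_loop (if c = '_' then 1 else 0) digits rest) := by
  simp only [pvB_loop]
  rw [if_neg hst]

-- states 0–6: the matcher invariant.  Having reached state st is the same as having
-- virtually read the pattern prefix take st; the loop result is `digits` when
-- "_frame_" never occurs, else digits ++ (digit run after the first occurrence).
theorem pvB_loop_search :
    ∀ (l : List Char) (st : Nat) (digits : List Char), st ≤ 6 →
      pvB_loop st digits l =
        match pvAfter ("_frame_".toList) (("_frame_".toList).take st ++ l) with
        | none => digits
        | some t => digits ++ t.takeWhile PySem.Chars.isdigit := by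
  intro l
  induction l with
  | nil =>
    intro st digits hst
    have hnone : pvAfter ("_frame_".toList) (("_frame_".toList).take st ++ []) = none := by
      interval_cases st <;> decide
    rw [pvB_loop_nil, hnone]
  | cons c rest ih =>
    intro st digits hst
    rw [pvB_loop_cons st (by omega) digits c rest]
    by_cases hm : c = ("_frame_".toList).getD st ' '
    · rw [if_pos hm]
      by_cases h6 : st = 6
      · -- full match: switch to the digit phase
        subst h6
        have hc : c = '_' := hm
        subst hc
        rw [pvB_loop_seven]
        have hAft : pvAfter ("_frame_".toList) (("_frame_".toList).take 6 ++ '_' :: rest)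
            = some rest := by
          show pvAfter ("_frame_".toList) ('_'::'f'::'r'::'a'::'m'::'e'::'_'::rest) = some rest
          have hpre : ("_frame_".toList).isPrefixOf ('_'::'f'::'r'::'a'::'m'::'e'::'_'::rest) = true :=
            List.isPrefixOf_iff_prefix.mpr ⟨rest, rfl⟩
          rw [pvAfter, if_pos hpre]
          rfl
        rw [hAft]
      · rw [ih (st + 1) digits (by omega)]
        have : ("_frame_".toList).take st ++ c :: rest = ("_frame_".toList).take (st + 1) ++ rest := by
          subst hm; interval_cases st <;> rfl
        rw [this]
    · -- mismatch: fall back to state 1 ('_') or 0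
      rw [if_neg hm]
      by_cases hu : c = '_'
      · subst hu
        rw [if_pos rfl, ih 1 digits (by omega)]
        have : pvAfter ("_frame_".toList) (("_frame_".toList).take st ++ '_' :: rest)
             = pvAfter ("_frame_".toList) (("_frame_".toList).take 1 ++ rest) := by
          interval_cases st
          · rfl
          · show pvAfter _ ('_'::'_'::rest) = pvAfter _ ('_'::rest)
            simp [pvAfter, List.isPrefixOf]
          · show pvAfter _ ('_'::'f'::'_'::rest) = pvAfter _ ('_'::rest)
            simp [pvAfter, List.isPrefixOf]
          · show pvAfter _ ('_'::'f'::'r'::'_'::rest) = pvAfter _ ('_'::rest)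
            simp [pvAfter, List.isPrefixOf]
          · show pvAfter _ ('_'::'f'::'r'::'a'::'_'::rest) = pvAfter _ ('_'::rest)
            simp [pvAfter, List.isPrefixOf]
          · show pvAfter _ ('_'::'f'::'r'::'a'::'m'::'_'::rest) = pvAfter _ ('_'::rest)
            simp [pvAfter, List.isPrefixOf]
          · exact absurd (rfl) (show ¬ ('_' : Char) = '_' from hm)
        rw [this]
      · rw [if_neg hu, ih 0 digits (by omega)]
        have : pvAfter ("_frame_".toList) (("_frame_".toList).take st ++ c :: rest)
             = pvAfter ("_frame_".toList) (("_frame_".toList).take 0 ++ rest) := by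
          interval_cases st
          · have hm0 : ¬ c = '_' := hm
            show pvAfter _ (c::rest) = pvAfter _ rest
            simp [pvAfter, List.isPrefixOf, Ne.symm hm0]
          · have hm1 : ¬ c = 'f' := hm
            show pvAfter _ ('_'::c::rest) = pvAfter _ rest
            simp [pvAfter, List.isPrefixOf, Ne.symm hm1, Ne.symm hu]
          · have hm2 : ¬ c = 'r' := hm
            show pvAfter _ ('_'::'f'::c::rest) = pvAfter _ rest
            simp [pvAfter, List.isPrefixOf, Ne.symm hm2, Ne.symm hu]
          · have hm3 : ¬ c = 'a' := hm
            show pvAfter _ ('_'::'f'::'r'::c::rest) = pvAfter _ rest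
            simp [pvAfter, List.isPrefixOf, Ne.symm hm3, Ne.symm hu]
          · have hm4 : ¬ c = 'm' := hm
            show pvAfter _ ('_'::'f'::'r'::'a'::c::rest) = pvAfter _ rest
            simp [pvAfter, List.isPrefixOf, Ne.symm hm4, Ne.symm hu]
          · have hm5 : ¬ c = 'e' := hm
            show pvAfter _ ('_'::'f'::'r'::'a'::'m'::c::rest) = pvAfter _ rest
            simp [pvAfter, List.isPrefixOf, Ne.symm hm5, Ne.symm hu]
          · have hm6 : ¬ c = '_' := hm
            show pvAfter _ ('_'::'f'::'r'::'a'::'m'::'e'::c::rest) = pvAfter _ rest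
            simp [pvAfter, List.isPrefixOf, Ne.symm hm6]
        rw [this]

theorem pv_main (name : String) : parse_frame_time_py name = parse_frame_time_py_alt name := by
  have hsep : ("_frame_".toList : List Char) ≠ [] := by decide
  have hdigU : PySem.Chars.isdigit '_' = false := by decide
  set s := name.toList with hs
  set sep := ("_frame_".toList : List Char) with hsepdef
  have hB : pvB_loop 0 [] s =
      match pvAfter sep s with
      | none => ([] : List Char)
      | some t => t.takeWhile PySem.Chars.isdigit := by
    have := pvB_loop_search s 0 [] (by omega)
    simpa [← hsepdef] using this
  have hsplit : PySem.Chars.splitOn s sep = PySem.Chars.splitOn.go sep (s.length + 1) s [] [] := rfl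
  cases hA : pvAfter sep s with
  | none =>
    -- no occurrence: A sees a single part, B's automaton never reaches state 7
    have hparts : PySem.Chars.splitOn s sep = [s] := by
      rw [hsplit, pv_go_spec sep hsep _ _ _ _ (by omega), hA]; simp
    show (if (PySem.Chars.splitOn s sep).length < 2 then none else _) = _
    rw [hparts]
    simp only [List.length_cons, List.length_nil]
    rw [if_pos (by omega)]
    show _ = (if (pvB_loop 0 [] s).isEmpty = true then none else _)
    rw [hB, hA]
    rfl
  | some t =>
    have hparts : PySem.Chars.splitOn s sep = pvBefore sep s :: PySem.Chars.splitOn t sep := by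
      rw [hsplit, pv_go_spec sep hsep _ _ _ _ (by omega), hA]; simp
    -- the head of `splitOn t sep` has the same leading digit run as t itself
    have hhead : ∃ h0 r, PySem.Chars.splitOn t sep = h0 :: r ∧
        h0.takeWhile PySem.Chars.isdigit = t.takeWhile PySem.Chars.isdigit := by
      have hsplit2 : PySem.Chars.splitOn t sep = PySem.Chars.splitOn.go sep (t.length + 1) t [] [] := rfl
      cases hA2 : pvAfter sep t with
      | none =>
        refine ⟨t, [], ?_, rfl⟩
        rw [hsplit2, pv_go_spec sep hsep _ _ _ _ (by omega), hA2]; simp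
      | some u =>
        refine ⟨pvBefore sep t, PySem.Chars.splitOn u sep, ?_, ?_⟩
        · rw [hsplit2, pv_go_spec sep hsep _ _ _ _ (by omega), hA2]; simp
        · have hd := pvAfter_decomp sep t u hA2
          conv_rhs => rw [hd]
          rw [show pvBefore sep t ++ sep ++ u = pvBefore sep t ++ '_' :: ("frame_".toList ++ u) by
            simp [hsepdef]]
          rw [takeWhile_append_false _ _ _ _ hdigU]
    obtain ⟨h0, r, hr, hrun⟩ := hhead
    set ds := t.takeWhile PySem.Chars.isdigit with hds
    -- A's side
    show (if (PySem.Chars.splitOn s sep).length < 2 then none else _) = _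
    rw [hparts, hr]
    simp only [List.length_cons]
    rw [if_neg (by omega)]
    have hget : PySem.List.pyGet? (pvBefore sep s :: h0 :: r) 1 = some h0 := by
      simp [PySem.List.pyGet?, PySem.List.pyIdx?]
    rw [hget]
    show (if (pvA_digits [] h0).isEmpty = true then none else PySem.Int.ofChars? (pvA_digits [] h0)) = _
    have hdigits : pvA_digits [] h0 = ds := by rw [pvA_digits_eq]; simpa using hrun
    rw [hdigits]
    -- B's side
    show _ = (if (pvB_loop 0 [] s).isEmpty = true then none else _)
    rw [hB, hA]

-- ===== VERDICT (by name: the statement is the Claim_ definition above) =====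
theorem parse_frame_time_py_spec : Claim_equal_parse_frame_time_py := by
  intro name _
  exact pv_main name
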